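-- pv_equiv track=rewrite | github.com/ShauThongHo/Discrete-Math | Q1D.py | amoeba_divisions
-- ===== SOURCE A (Python) =====
-- MOD = 10**9
--
-- def amoeba_divisions(N):
--     dp = {}
--     dp[(0, 0, 0)] = 1
--
--     for _ in range(N):
--         new_dp = {}
--         for (x, y, z), count in dp.items():
--             for dx, dy, dz in [(1, 0, 0), (0, 1, 0), (0, 0, 1)]:
--                 new_pos = (x + dx, y + dy, z + dz)
--                 if new_pos not in new_dp:
--                     new_dp[new_pos] = 0
--                 new_dp[new_pos] = (new_dp[new_pos] + count) % MOD
--         dp = new_dp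
--
--     return sum(dp.values()) % MOD
-- ===== SOURCE B (Python) =====
-- MOD = 10**9
--
-- def amoeba_divisions(N):
--     # each of the N steps independently picks one of 3 directions: 3**N paths
--     return pow(3, N, MOD)
-- ===== Notes on version B (the rewrite author's own statement) =====
-- stated objective: faster
-- what changed: A enumerates all lattice positions reachable in N steps in a dict-based DP; B notes that every path is a free choice among 3 directions per step and returns pow(3, N, MOD) by fast modular exponentiation. Pre_ excludes negative N, outside the natural domain of a step count: A's loop runs zero times and returns 1 there, while pow(3, N, MOD) computes a modular inverse.
-- outside the precondition, e.g. on amoeba_divisions(-1): A returns 1, B returns 666666667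
import Mathlib
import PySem

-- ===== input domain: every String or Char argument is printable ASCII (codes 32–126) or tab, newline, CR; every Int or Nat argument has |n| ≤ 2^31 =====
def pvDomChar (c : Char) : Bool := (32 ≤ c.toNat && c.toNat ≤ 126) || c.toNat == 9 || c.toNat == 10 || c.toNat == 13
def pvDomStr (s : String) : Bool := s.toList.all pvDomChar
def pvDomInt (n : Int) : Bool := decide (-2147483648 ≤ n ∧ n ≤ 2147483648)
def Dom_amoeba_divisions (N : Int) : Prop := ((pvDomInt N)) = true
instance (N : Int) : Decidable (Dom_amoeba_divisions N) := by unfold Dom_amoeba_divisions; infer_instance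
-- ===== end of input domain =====

-- B replaces A's dict-based lattice DP by pow(3, N, MOD): each of the N steps is a free
-- choice among 3 directions, so the answer is 3^N mod 10^9 (asymptotically faster).


-- ===== PORT A =====
-- A's dicts are kept as hash maps (Python's dict is a hash table); only lookups,
-- membership, item iteration and the final value sum are used, none of which depends
-- on insertion order, so the computed values are exactly A's.
def MOD : Int := 1000000000

def pvDirs : List (Int × Int × Int) := [(1, 0, 0), (0, 1, 0), (0, 0, 1)]

-- the two inner statements: 'if new_pos not in new_dp: new_dp[new_pos] = 0;
-- new_dp[new_pos] = (new_dp[new_pos] + count) % MOD'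
def pvAddOne (nd : Std.HashMap (Int × Int × Int) Int) (np : Int × Int × Int) (c : Int) :
    Std.HashMap (Int × Int × Int) Int :=
  let nd1 := if nd.contains np then nd else nd.insert np 0
  nd1.insert np (PySem.Int.mod (nd1.getD np 0 + c) MOD)

-- one iteration of A's outer 'for _ in range(N)' body
def pvStep (dp : Std.HashMap (Int × Int × Int) Int) : Std.HashMap (Int × Int × Int) Int :=
  dp.toList.foldl
    (fun nd kv =>
      pvDirs.foldl
        (fun nd dxyz =>
          pvAddOne nd (kv.1.1 + dxyz.1, kv.1.2.1 + dxyz.2.1, kv.1.2.2 + dxyz.2.2) kv.2)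
        nd)
    ∅

def amoeba_divisions (N : Int) : Int :=
  -- 'sum(dp.values())' is the sum of the items' second components
  PySem.Int.mod
    ((((PySem.List.pyRange 0 N 1).foldl (fun dp _ => pvStep dp)
        ((∅ : Std.HashMap (Int × Int × Int) Int).insert ((0 : Int), (0 : Int), (0 : Int)) 1)).toList.map
          Prod.snd).sum)
    MOD

-- ===== PORT B =====
-- pow(base, e, m) for e ≥ 0, m > 0: binary exponentiation, exact for Python's 3-argument pow
def pvPowMod (b : Int) (e : Nat) (m : Int) : Int :=
  if e = 0 then PySem.Int.mod 1 m
  else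
    let r := pvPowMod b (e / 2) m
    let r2 := PySem.Int.mod (r * r) m
    if e % 2 = 1 then PySem.Int.mod (r2 * b) m else r2
decreasing_by omega

def amoeba_divisions_alt (N : Int) : Int := pvPowMod 3 N.toNat MOD

-- ===== PRECONDITION & SPEC =====
-- Pre_ excludes negative N, outside the natural domain of a step count: A's loop runs zero
-- times and returns 1 there, while pow(3, N, MOD) computes a modular inverse.
def Pre_amoeba_divisions (N : Int) : Prop := 0 ≤ N
instance (N : Int) : Decidable (Pre_amoeba_divisions N) := by unfold Pre_amoeba_divisions; infer_instance
def pvWitness_amoeba_divisions : Int := 4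

def Spec_amoeba_divisions (N : Int) (out : Int) : Prop := out = amoeba_divisions_alt N
instance (N : Int) (out : Int) : Decidable (Spec_amoeba_divisions N out) := by unfold Spec_amoeba_divisions; infer_instance

-- ===== CLAIM (what is proved, stated in full; the proofs are below) =====
def Claim_equal_amoeba_divisions : Prop := ∀ (N : Int), Dom_amoeba_divisions N → Pre_amoeba_divisions N → Spec_amoeba_divisions N (amoeba_divisions N)

-- ===== LEMMAS AND PROOFS =====

-- sum of the values of a hash map's item list
def pvS (m : Std.HashMap (Int × Int × Int) Int) : Int := (m.toList.map Prod.snd).sum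

lemma pv_MOD_pos : 0 < MOD := by unfold MOD; norm_num

lemma pv_emod_modEq (a m : Int) : a % m ≡ a [ZMOD m] :=
  Int.emod_emod_of_dvd a dvd_rfl

lemma pv_mod_modEq (a : Int) : PySem.Int.mod a MOD ≡ a [ZMOD MOD] := by
  rw [PySem.Int.mod_eq_emod_of_pos pv_MOD_pos]
  exact pv_emod_modEq a MOD

-- dropping the unique entry with key k from a list with pairwise-distinct keys
-- removes exactly w from the sum of the values
lemma pv_sum_filter {K : Type} [BEq K] [LawfulBEq K] (l : List (K × Int)) (k : K) (w : Int)
    (hpw : l.Pairwise (fun a b => (a.1 == b.1) = false)) (hmem : (k, w) ∈ l) :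
    ((l.filter (fun p => !(k == p.1))).map Prod.snd).sum = (l.map Prod.snd).sum - w := by
  induction l with
  | nil => cases hmem
  | cons p t ih =>
    rw [List.pairwise_cons] at hpw
    rcases List.mem_cons.mp hmem with h | h
    · have hp : p = (k, w) := h.symm
      subst hp
      have ht : t.filter (fun p => !(k == p.1)) = t := by
        apply List.filter_eq_self.mpr
        intro q hq
        have := hpw.1 q hq
        simp at this ⊢
        intro he
        first
          | exact this he
          | exact this he.symm
      simp [ht]
    · have hfalse : (k == p.1) = false := by
        rw [Bool.eq_false_iff]
        intro he
        have hk : k = p.1 := by simpa using he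
        have := hpw.1 (k, w) h
        simp [← hk] at this
      rw [List.filter_cons]
      simp only [hfalse, Bool.not_false]
      rw [if_pos trivial]
      simp only [List.map_cons, List.sum_cons]
      rw [ih hpw.2 h]
      ring

-- value-sum of an insert
lemma pv_sum_insert (m : Std.HashMap (Int × Int × Int) Int) (k : Int × Int × Int) (v : Int) :
    pvS (m.insert k v) = pvS m + v - m.getD k 0 := by
  unfold pvS
  have hp := (Std.HashMap.toList_insert_perm (m := m) (k := k) (v := v)).map Prod.snd
  rw [hp.sum_eq]
  simp only [List.map_cons, List.sum_cons]
  have hfe : (fun x : (Int × Int × Int) × Int => decide ¬(k == x.1) = true)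
      = fun p : (Int × Int × Int) × Int => !(k == p.1) := by
    funext p
    cases hkp : (k == p.1) <;> simp [hkp]
  rcases hw : m[k]? with _ | w
  · have hfilter : m.toList.filter (fun p => !(k == p.1)) = m.toList := by
      apply List.filter_eq_self.mpr
      intro q hq
      simp only [Bool.not_eq_eq_eq_not, Bool.not_true, beq_eq_false_iff_ne, ne_eq]
      intro he
      have hq2 : (q.1, q.2) ∈ m.toList := by simpa using hq
      have := Std.HashMap.mem_toList_iff_getElem?_eq_some.mp hq2
      rw [← he] at this
      rw [hw] at this
      cases this
    rw [hfe, hfilter, Std.HashMap.getD_eq_getD_getElem?, hw]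
    simp
    ring
  · have hmem := Std.HashMap.mem_toList_iff_getElem?_eq_some.mpr hw
    rw [Std.HashMap.getD_eq_getD_getElem?, hw]
    rw [hfe, pv_sum_filter m.toList k w Std.HashMap.distinct_keys_toList hmem]
    simp
    ring

lemma pv_addOne_sum (nd : Std.HashMap (Int × Int × Int) Int) (np : Int × Int × Int)
    (c : Int) : pvS (pvAddOne nd np c) ≡ pvS nd + c [ZMOD MOD] := by
  unfold pvAddOne
  by_cases hc : nd.contains np = true
  · rw [if_pos hc]
    rw [pv_sum_insert nd np _]
    have := (pv_mod_modEq (nd.getD np 0 + c)).add_left (pvS nd - nd.getD np 0)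
    calc pvS nd + PySem.Int.mod (nd.getD np 0 + c) MOD - nd.getD np 0
        = pvS nd - nd.getD np 0 + PySem.Int.mod (nd.getD np 0 + c) MOD := by ring
      _ ≡ pvS nd - nd.getD np 0 + (nd.getD np 0 + c) [ZMOD MOD] := this
      _ = pvS nd + c := by ring
  · rw [if_neg hc]
    have hg : nd.getD np 0 = 0 := by
      rw [Std.HashMap.getD_eq_getD_getElem?, Std.HashMap.getElem?_eq_none]
      · rfl
      · rw [Std.HashMap.mem_iff_contains]
        simp [hc]
    have hg1 : (nd.insert np 0).getD np 0 = 0 := by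
      rw [Std.HashMap.getD_insert]
      simp
    rw [pv_sum_insert _ np _, pv_sum_insert nd np 0, hg, hg1]
    have := (pv_mod_modEq (0 + c)).add_left (pvS nd + 0 - 0 - 0)
    calc pvS nd + 0 - 0 + PySem.Int.mod (0 + c) MOD - 0
        = pvS nd + 0 - 0 - 0 + PySem.Int.mod (0 + c) MOD := by ring
      _ ≡ pvS nd + 0 - 0 - 0 + (0 + c) [ZMOD MOD] := this
      _ = pvS nd + c := by ring

-- one item of dp processed against the three directions
lemma pv_inner_sum (nd : Std.HashMap (Int × Int × Int) Int) (kv : (Int × Int × Int) × Int) :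
    pvS ((pvDirs.foldl
        (fun nd dxyz =>
          pvAddOne nd (kv.1.1 + dxyz.1, kv.1.2.1 + dxyz.2.1, kv.1.2.2 + dxyz.2.2) kv.2)
        nd)) ≡ pvS nd + 3 * kv.2 [ZMOD MOD] := by
  simp only [pvDirs, List.foldl]
  calc pvS (pvAddOne (pvAddOne (pvAddOne nd _ kv.2) _ kv.2) _ kv.2)
      ≡ pvS (pvAddOne (pvAddOne nd _ kv.2) _ kv.2) + kv.2 [ZMOD MOD] := pv_addOne_sum _ _ _
    _ ≡ (pvS (pvAddOne nd _ kv.2) + kv.2) + kv.2 [ZMOD MOD] := (pv_addOne_sum _ _ _).add_right kv.2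
    _ ≡ ((pvS nd + kv.2) + kv.2) + kv.2 [ZMOD MOD] := ((pv_addOne_sum _ _ _).add_right kv.2).add_right kv.2
    _ = pvS nd + 3 * kv.2 := by ring

lemma pv_outer (l : List ((Int × Int × Int) × Int)) (nd : Std.HashMap (Int × Int × Int) Int) :
    pvS (l.foldl
        (fun nd kv =>
          pvDirs.foldl
            (fun nd dxyz =>
              pvAddOne nd (kv.1.1 + dxyz.1, kv.1.2.1 + dxyz.2.1, kv.1.2.2 + dxyz.2.2) kv.2)
            nd)
        nd) ≡ pvS nd + 3 * (l.map Prod.snd).sum [ZMOD MOD] := by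
  induction l generalizing nd with
  | nil => simp
  | cons kv t ih =>
    simp only [List.foldl_cons]
    have hstep := (pv_inner_sum nd kv).add_right (3 * (t.map Prod.snd).sum)
    have htot := (ih _).trans hstep
    have heq : pvS nd + 3 * kv.2 + 3 * (t.map Prod.snd).sum
        = pvS nd + 3 * ((kv :: t).map Prod.snd).sum := by
      simp only [List.map_cons, List.sum_cons]
      ring
    exact heq ▸ htot

lemma pv_step_sum (d : Std.HashMap (Int × Int × Int) Int) :
    pvS (pvStep d) ≡ 3 * pvS d [ZMOD MOD] := by
  have h := pv_outer d.toList (∅ : Std.HashMap (Int × Int × Int) Int)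
  unfold pvStep
  have hempty : pvS (∅ : Std.HashMap (Int × Int × Int) Int) = 0 := by
    unfold pvS
    rw [Std.HashMap.toList_empty]
    rfl
  rw [hempty, zero_add] at h
  exact h

lemma pv_loop (n : Nat) :
    pvS ((PySem.List.pyRange 0 (n : Int) 1).foldl (fun dp _ => pvStep dp)
        ((∅ : Std.HashMap (Int × Int × Int) Int).insert ((0 : Int), (0 : Int), (0 : Int)) 1))
      ≡ 3 ^ n [ZMOD MOD] := by
  induction n with
  | zero =>
    rw [Int.natCast_zero, PySem.List.pyRange_one_eq_nil (le_refl (0 : Int))]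
    simp only [List.foldl_nil, pow_zero]
    rw [pv_sum_insert]
    have hempty : pvS (∅ : Std.HashMap (Int × Int × Int) Int) = 0 := by
      unfold pvS
      rw [Std.HashMap.toList_empty]
      rfl
    rw [hempty, Std.HashMap.getD_empty]
    norm_num
  | succ m ih =>
    have hcast : ((m + 1 : Nat) : Int) = (m : Int) + 1 := by push_cast; ring
    rw [hcast, PySem.List.pyRange_one_succ_right (Int.natCast_nonneg m), List.foldl_append]
    simp only [List.foldl_cons, List.foldl_nil]
    calc pvS (pvStep _)
        ≡ 3 * _ [ZMOD MOD] := pv_step_sum _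
      _ ≡ 3 * 3 ^ m [ZMOD MOD] := ih.mul_left 3
      _ = 3 ^ (m + 1) := by ring

lemma pv_powMod_eq (b : Int) (e : Nat) (m : Int) (hm : 0 < m) :
    pvPowMod b e m = b ^ e % m := by
  induction e using Nat.strong_induction_on with
  | _ e ih =>
    rw [pvPowMod]
    by_cases he : e = 0
    · rw [if_pos he, he, pow_zero, PySem.Int.mod_eq_emod_of_pos hm]
    · rw [if_neg he]
      have ihq := ih (e / 2) (by omega)
      simp only [PySem.Int.mod_eq_emod_of_pos hm]
      have hr2 : b ^ (e / 2) % m * (b ^ (e / 2) % m) ≡ b ^ (e / 2) * b ^ (e / 2) [ZMOD m] :=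
        (pv_emod_modEq (b ^ (e / 2)) m).mul (pv_emod_modEq (b ^ (e / 2)) m)
      by_cases hp : e % 2 = 1
      · rw [if_pos hp, ihq]
        have h1 : b ^ (e / 2) % m * (b ^ (e / 2) % m) % m * b
            ≡ b ^ (e / 2) * b ^ (e / 2) * b [ZMOD m] :=
          ((pv_emod_modEq (b ^ (e / 2) % m * (b ^ (e / 2) % m)) m).trans hr2).mul_right b
        have h2 : b ^ (e / 2) * b ^ (e / 2) * b = b ^ e := by
          rw [← pow_add, ← pow_succ]
          congr 1
          omega
        calc b ^ (e / 2) % m * (b ^ (e / 2) % m) % m * b % m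
            = (b ^ (e / 2) * b ^ (e / 2) * b) % m := h1
          _ = b ^ e % m := by rw [h2]
      · rw [if_neg hp, ihq]
        have h2 : b ^ (e / 2) * b ^ (e / 2) = b ^ e := by
          rw [← pow_add]
          congr 1
          omega
        calc b ^ (e / 2) % m * (b ^ (e / 2) % m) % m
            = (b ^ (e / 2) * b ^ (e / 2)) % m := hr2
          _ = b ^ e % m := by rw [h2]

-- ===== VERDICT (by name: the statement is the Claim_ definition above) =====
theorem amoeba_divisions_spec : Claim_equal_amoeba_divisions := by
  intro N _ hpre
  unfold Spec_amoeba_divisions amoeba_divisions amoeba_divisions_alt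
  rw [pv_powMod_eq 3 N.toNat MOD pv_MOD_pos,
      PySem.Int.mod_eq_emod_of_pos pv_MOD_pos]
  have hN : ((N.toNat : Nat) : Int) = N := Int.toNat_of_nonneg hpre
  have := pv_loop N.toNat
  rw [hN] at this
  exact this
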